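-- pv_equiv track=rewrite | github.com/ivanlyubimtsev/NEVOD_EAS_NN | src/training/GCN.py | del_zero_arrays
-- ===== SOURCE A (Python) =====
-- def del_zero_arrays(power, age, coordinate_x, coordinate_y, angle_tetta, angle_phi, energy, time):
--     zero_indexes = []
--     for i in range(len(energy)):
--         if energy[i].count(0) == len(energy[i]):
--             zero_indexes.append(i)
--
--     zero_indexes.sort(reverse=True)
--
--     for index in zero_indexes:
--         del power[index]
--         del age[index]
--         del coordinate_x[index]
--         del coordinate_y[index]
--         del angle_tetta[index]
--         del angle_phi[index]
--         del energy[index]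
--         del time[index]
--
--     return power, age, coordinate_x, coordinate_y, angle_tetta, angle_phi, energy, time
-- ===== SOURCE B (Python) =====
-- def del_zero_arrays(power, age, coordinate_x, coordinate_y, angle_tetta, angle_phi, energy, time):
--     zero = {i for i, e in enumerate(energy) if e.count(0) == len(e)}
--     lists = (power, age, coordinate_x, coordinate_y, angle_tetta, angle_phi, energy, time)
--     for lst in lists:
--         lst[:] = [x for i, x in enumerate(lst) if i not in zero]
--     return lists
-- ===== Notes on version B (the rewrite author's own statement) =====
-- stated objective: alternative
-- what changed: Replaces A's collect-indices, sort(reverse=True) and per-index del from all eight lists by building the zero-row index set once and rewriting each list in a single filtering pass (slice assignment keeps the in-place mutation).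
import Mathlib
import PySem

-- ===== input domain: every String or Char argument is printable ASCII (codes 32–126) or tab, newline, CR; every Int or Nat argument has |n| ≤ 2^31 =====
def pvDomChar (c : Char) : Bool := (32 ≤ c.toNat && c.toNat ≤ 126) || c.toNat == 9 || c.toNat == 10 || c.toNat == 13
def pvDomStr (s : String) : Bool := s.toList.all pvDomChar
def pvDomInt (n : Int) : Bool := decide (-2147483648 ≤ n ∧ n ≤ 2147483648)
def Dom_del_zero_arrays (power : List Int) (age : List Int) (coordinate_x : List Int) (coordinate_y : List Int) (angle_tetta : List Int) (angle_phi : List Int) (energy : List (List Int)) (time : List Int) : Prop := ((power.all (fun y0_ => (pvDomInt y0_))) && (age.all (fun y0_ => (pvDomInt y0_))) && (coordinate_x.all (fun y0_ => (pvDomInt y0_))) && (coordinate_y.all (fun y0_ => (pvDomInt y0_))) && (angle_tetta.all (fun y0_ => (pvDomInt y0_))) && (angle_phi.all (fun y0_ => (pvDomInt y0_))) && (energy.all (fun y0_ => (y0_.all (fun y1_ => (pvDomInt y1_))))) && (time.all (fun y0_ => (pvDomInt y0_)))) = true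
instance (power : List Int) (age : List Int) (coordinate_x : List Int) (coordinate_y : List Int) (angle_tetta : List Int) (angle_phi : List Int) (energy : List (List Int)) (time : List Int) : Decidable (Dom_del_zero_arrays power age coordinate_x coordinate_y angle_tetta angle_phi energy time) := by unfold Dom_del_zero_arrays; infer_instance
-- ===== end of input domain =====

-- B replaces A's collect-sort-and-repeatedly-delete pass by one index-set + one filtering pass per list
-- (objective: alternative/simpler single-pass structure). Both Pythons mutate the eight lists in place
-- identically; the theorems here are about the returned value.

-- ===== PORT A =====
-- energy[i].count(0) == len(energy[i])  (shared row predicate of both sources)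
def pvRowZero (e : List Int) : Bool := PySem.List.count e 0 == e.length

-- del lst[index]; 'none' = IndexError, excluded by Pre_ (the getD-fallback is never reached under Pre_)
def pvDelIdx {α : Type} (l : List α) (i : Int) : List α :=
  match PySem.List.pop? l i with
  | some r => r.2
  | none => l

def del_zero_arrays (power : List Int) (age : List Int) (coordinate_x : List Int) (coordinate_y : List Int) (angle_tetta : List Int) (angle_phi : List Int) (energy : List (List Int)) (time : List Int) : List Int × List Int × List Int × List Int × List Int × List Int × List (List Int) × List Int :=
  -- for i in range(len(energy)): if energy[i].count(0) == len(energy[i]): zero_indexes.append(i)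
  -- (i is always in range, so energy[i] is pyGetD energy i [] exactly)
  let zero_indexes : List Int :=
    (PySem.List.pyRange 0 (energy.length : Int) 1).foldl
      (fun acc i => if pvRowZero (PySem.List.pyGetD energy i []) then acc ++ [i] else acc) []
  -- zero_indexes.sort(reverse=True)
  let zs := PySem.List.sorted zero_indexes (fun x => x) true
  -- for index in zero_indexes: del power[index]; …; del time[index]
  zs.foldl
    (fun st idx =>
      (pvDelIdx st.1 idx, pvDelIdx st.2.1 idx, pvDelIdx st.2.2.1 idx, pvDelIdx st.2.2.2.1 idx,
       pvDelIdx st.2.2.2.2.1 idx, pvDelIdx st.2.2.2.2.2.1 idx, pvDelIdx st.2.2.2.2.2.2.1 idx,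
       pvDelIdx st.2.2.2.2.2.2.2 idx))
    (power, age, coordinate_x, coordinate_y, angle_tetta, angle_phi, energy, time)

-- ===== PORT B =====
-- [x for i, x in enumerate(lst) if i not in zero]
def pvKeep {α : Type} (zero : PySem.Set Int) (l : List α) : List α :=
  ((PySem.List.enumerate l 0).filter (fun p => !(PySem.Set.contains zero p.1))).map (·.2)

def del_zero_arrays_alt (power : List Int) (age : List Int) (coordinate_x : List Int) (coordinate_y : List Int) (angle_tetta : List Int) (angle_phi : List Int) (energy : List (List Int)) (time : List Int) : List Int × List Int × List Int × List Int × List Int × List Int × List (List Int) × List Int :=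
  -- zero = {i for i, e in enumerate(energy) if e.count(0) == len(e)}
  let zero : PySem.Set Int :=
    PySem.Set.ofList (((PySem.List.enumerate energy 0).filter (fun p => pvRowZero p.2)).map (·.1))
  (pvKeep zero power, pvKeep zero age, pvKeep zero coordinate_x, pvKeep zero coordinate_y,
   pvKeep zero angle_tetta, pvKeep zero angle_phi, pvKeep zero energy, pvKeep zero time)

-- ===== PRECONDITION & SPEC =====
-- Pre_ excludes exactly the inputs on which A raises IndexError: a to-be-deleted index (an all-zeros
-- row of `energy`) that is out of range for one of the seven other (shorter) parallel lists.
def Pre_del_zero_arrays (power : List Int) (age : List Int) (coordinate_x : List Int) (coordinate_y : List Int) (angle_tetta : List Int) (angle_phi : List Int) (energy : List (List Int)) (time : List Int) : Prop :=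
  ∀ k : Nat, k < energy.length → pvRowZero (energy.getD k []) = true →
    (k < power.length ∧ k < age.length ∧ k < coordinate_x.length ∧ k < coordinate_y.length ∧
     k < angle_tetta.length ∧ k < angle_phi.length ∧ k < time.length)
instance (power : List Int) (age : List Int) (coordinate_x : List Int) (coordinate_y : List Int) (angle_tetta : List Int) (angle_phi : List Int) (energy : List (List Int)) (time : List Int) : Decidable (Pre_del_zero_arrays power age coordinate_x coordinate_y angle_tetta angle_phi energy time) := by unfold Pre_del_zero_arrays; infer_instance

def pvWitness_del_zero_arrays : List Int × List Int × List Int × List Int × List Int × List Int × List (List Int) × List Int :=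
  ([1, 2], [3, 4], [5, 6], [7, 8], [9, 10], [11, 12], [[0, 0], [1, 0]], [13, 14])

def Spec_del_zero_arrays (power : List Int) (age : List Int) (coordinate_x : List Int) (coordinate_y : List Int) (angle_tetta : List Int) (angle_phi : List Int) (energy : List (List Int)) (time : List Int) (out : List Int × List Int × List Int × List Int × List Int × List Int × List (List Int) × List Int) : Prop := out = del_zero_arrays_alt power age coordinate_x coordinate_y angle_tetta angle_phi energy time
instance (power : List Int) (age : List Int) (coordinate_x : List Int) (coordinate_y : List Int) (angle_tetta : List Int) (angle_phi : List Int) (energy : List (List Int)) (time : List Int) (out : List Int × List Int × List Int × List Int × List Int × List Int × List (List Int) × List Int) : Decidable (Spec_del_zero_arrays power age coordinate_x coordinate_y angle_tetta angle_phi energy time out) := by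
  unfold Spec_del_zero_arrays
  haveI : DecidableEq (List (List Int) × List Int) := instDecidableEqProd
  haveI : DecidableEq (List Int × List (List Int) × List Int) := instDecidableEqProd
  haveI : DecidableEq (List Int × List Int × List (List Int) × List Int) := instDecidableEqProd
  haveI : DecidableEq (List Int × List Int × List Int × List (List Int) × List Int) := instDecidableEqProd
  haveI : DecidableEq (List Int × List Int × List Int × List Int × List (List Int) × List Int) := instDecidableEqProd
  haveI : DecidableEq (List Int × List Int × List Int × List Int × List Int × List (List Int) × List Int) := instDecidableEqProd
  haveI : DecidableEq (List Int × List Int × List Int × List Int × List Int × List Int × List (List Int) × List Int) := instDecidableEqProd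
  infer_instance

-- ===== CLAIM (what is proved, stated in full; the proofs are below) =====
def Claim_equal_del_zero_arrays : Prop := ∀ (power : List Int) (age : List Int) (coordinate_x : List Int) (coordinate_y : List Int) (angle_tetta : List Int) (angle_phi : List Int) (energy : List (List Int)) (time : List Int), Dom_del_zero_arrays power age coordinate_x coordinate_y angle_tetta angle_phi energy time → Pre_del_zero_arrays power age coordinate_x coordinate_y angle_tetta angle_phi energy time → Spec_del_zero_arrays power age coordinate_x coordinate_y angle_tetta angle_phi energy time (del_zero_arrays power age coordinate_x coordinate_y angle_tetta angle_phi energy time)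
-- ===== LEMMAS AND PROOFS =====

-- the common normal form: keep every element of l whose index is not an all-zeros index below n
def pvE {α : Type} (Pf : Int → Bool) (n : Nat) (l : List α) : List α :=
  ((PySem.List.enumerate l 0).filter (fun p => !(decide (p.1 < (n : Int)) && Pf p.1))).map (·.2)

-- A's fold over the 8-tuple state is 8 independent folds
theorem pvFoldl_del8 (zs : List Int) (a b c d e f : List Int) (g : List (List Int)) (h : List Int) :
    zs.foldl (fun st idx =>
      (pvDelIdx st.1 idx, pvDelIdx st.2.1 idx, pvDelIdx st.2.2.1 idx, pvDelIdx st.2.2.2.1 idx,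
       pvDelIdx st.2.2.2.2.1 idx, pvDelIdx st.2.2.2.2.2.1 idx, pvDelIdx st.2.2.2.2.2.2.1 idx,
       pvDelIdx st.2.2.2.2.2.2.2 idx)) (a, b, c, d, e, f, g, h)
    = (zs.foldl pvDelIdx a, zs.foldl pvDelIdx b, zs.foldl pvDelIdx c, zs.foldl pvDelIdx d,
       zs.foldl pvDelIdx e, zs.foldl pvDelIdx f, zs.foldl pvDelIdx g, zs.foldl pvDelIdx h) := by
  induction zs generalizing a b c d e f g h with
  | nil => rfl
  | cons x xs ih => simp only [List.foldl_cons, ih]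

theorem pvFilter_enum_all {α : Type} (xs : List α) (s : Int) (q : Int × α → Bool)
    (hq : ∀ (k : Nat) (h : k < xs.length), q (s + (k : Int), xs[k]) = true) :
    (PySem.List.enumerate xs s).filter q = PySem.List.enumerate xs s := by
  apply List.filter_eq_self.mpr
  intro p hp
  rw [PySem.List.mem_enumerate_iff] at hp
  obtain ⟨k, h, rfl⟩ := hp
  exact hq k h

theorem pvE_zero {α : Type} (Pf : Int → Bool) (l : List α) : pvE Pf 0 l = l := by
  unfold pvE
  rw [pvFilter_enum_all _ _ _ (fun k h => by
    have e1 : decide (((0 : Int) + (k : Int)) < ((0 : Nat) : Int)) = false := by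
      simp only [decide_eq_false_iff_not]; omega
    rw [e1, Bool.false_and, Bool.not_false])]
  exact PySem.List.map_snd_enumerate l 0

theorem pvE_congr_succ {α : Type} (Pf : Int → Bool) (n : Nat) (l : List α)
    (hn : Pf (n : Int) = false) : pvE Pf n l = pvE Pf (n + 1) l := by
  unfold pvE
  congr 1
  apply List.filter_congr
  intro p hp
  rw [PySem.List.mem_enumerate_iff] at hp
  obtain ⟨k, h, rfl⟩ := hp
  simp only [zero_add]
  by_cases hk : k < n
  · have e1 : decide ((k : Int) < ((n : Nat) : Int)) = true := by
      simp only [decide_eq_true_eq]; omega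
    have e2 : decide ((k : Int) < ((n + 1 : Nat) : Int)) = true := by
      simp only [decide_eq_true_eq]; omega
    rw [e1, e2]
  · by_cases hk2 : k = n
    · subst hk2
      have e1 : decide ((k : Int) < ((k : Nat) : Int)) = false := by
        simp only [decide_eq_false_iff_not]; omega
      have e2 : decide ((k : Int) < ((k + 1 : Nat) : Int)) = true := by
        simp only [decide_eq_true_eq]; omega
      rw [e1, e2, hn, Bool.false_and, Bool.and_false]
    · have e1 : decide ((k : Int) < ((n : Nat) : Int)) = false := by
        simp only [decide_eq_false_iff_not]; omega
      have e2 : decide ((k : Int) < ((n + 1 : Nat) : Int)) = false := by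
        simp only [decide_eq_false_iff_not]; omega
      rw [e1, e2]

theorem pvE_erase {α : Type} (Pf : Int → Bool) (n : Nat) (l : List α)
    (hnl : n < l.length) (hn : Pf (n : Int) = true) :
    pvE Pf n (l.eraseIdx n) = pvE Pf (n + 1) l := by
  have hsplit : l = l.take n ++ l[n] :: l.drop (n + 1) := by
    conv_lhs => rw [← List.take_append_drop n l, List.drop_eq_getElem_cons hnl]
  have hlen : (l.take n).length = n := by simp [List.length_take]; omega
  unfold pvE
  conv_rhs => rw [hsplit]
  rw [List.eraseIdx_eq_take_drop_succ]
  rw [PySem.List.enumerate_append, PySem.List.enumerate_append, hlen]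
  rw [PySem.List.enumerate_cons]
  rw [List.filter_append, List.filter_append, List.filter_cons]
  have hhead : (!(decide (((0 : Int) + (n : Nat)) < ((n + 1 : Nat) : Int)) && Pf ((0 : Int) + (n : Nat)))) = false := by
    have e1 : decide (((0 : Int) + (n : Nat)) < ((n + 1 : Nat) : Int)) = true := by
      simp only [decide_eq_true_eq]; omega
    rw [e1, zero_add, hn, Bool.and_self, Bool.not_true]
  rw [hhead]
  simp only [Bool.false_eq_true, if_false]
  have hpre : (PySem.List.enumerate (l.take n) 0).filter (fun p => !(decide (p.1 < ((n : Nat) : Int)) && Pf p.1))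
      = (PySem.List.enumerate (l.take n) 0).filter (fun p => !(decide (p.1 < ((n + 1 : Nat) : Int)) && Pf p.1)) := by
    apply List.filter_congr
    intro p hp
    rw [PySem.List.mem_enumerate_iff] at hp
    obtain ⟨k, h, rfl⟩ := hp
    rw [hlen] at h
    simp only [zero_add]
    have e1 : decide ((k : Int) < ((n : Nat) : Int)) = true := by
      simp only [decide_eq_true_eq]; omega
    have e2 : decide ((k : Int) < ((n + 1 : Nat) : Int)) = true := by
      simp only [decide_eq_true_eq]; omega
    rw [e1, e2]
  have hsuf1 : (PySem.List.enumerate (l.drop (n + 1)) ((0 : Int) + (n : Nat))).filter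
      (fun p => !(decide (p.1 < ((n : Nat) : Int)) && Pf p.1)) = PySem.List.enumerate (l.drop (n + 1)) ((0 : Int) + (n : Nat)) := by
    apply pvFilter_enum_all
    intro k h
    have e1 : decide (((0 : Int) + (n : Nat) + (k : Int)) < ((n : Nat) : Int)) = false := by
      simp only [decide_eq_false_iff_not]; omega
    rw [e1, Bool.false_and, Bool.not_false]
  have hsuf2 : (PySem.List.enumerate (l.drop (n + 1)) ((0 : Int) + (n : Nat) + 1)).filter
      (fun p => !(decide (p.1 < ((n + 1 : Nat) : Int)) && Pf p.1)) = PySem.List.enumerate (l.drop (n + 1)) ((0 : Int) + (n : Nat) + 1) := by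
    apply pvFilter_enum_all
    intro k h
    have e1 : decide (((0 : Int) + (n : Nat) + 1 + (k : Int)) < ((n + 1 : Nat) : Int)) = false := by
      simp only [decide_eq_false_iff_not]; omega
    rw [e1, Bool.false_and, Bool.not_false]
  rw [hpre, hsuf1, hsuf2]
  simp only [List.map_append]
  rw [PySem.List.map_snd_enumerate, PySem.List.map_snd_enumerate]

theorem pvDel_eq_E {α : Type} (Pf : Int → Bool) (n : Nat) (l : List α)
    (hb : ∀ k : Nat, k < n → Pf (k : Int) = true → k < l.length) :
    (((PySem.List.pyRange 0 (n : Int) 1).filter Pf).reverse).foldl pvDelIdx l = pvE Pf n l := by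
  induction n generalizing l with
  | zero =>
    rw [PySem.List.pyRange_one_eq_nil (by omega)]
    simp [pvE_zero]
  | succ n ih =>
    have hcast : ((n + 1 : Nat) : Int) = (n : Int) + 1 := by omega
    rw [hcast, PySem.List.pyRange_one_succ_right (by omega)]
    rw [List.filter_append, List.reverse_append, List.filter_cons, List.filter_nil]
    by_cases hn : Pf (n : Int) = true
    · have hnl : n < l.length := hb n (by omega) hn
      rw [hn]
      simp only [if_true, List.reverse_cons, List.reverse_nil, List.nil_append, List.cons_append,
        List.foldl_cons]
      have hdel : pvDelIdx l ((n : Nat) : Int) = l.eraseIdx n := by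
        simp [pvDelIdx, PySem.List.pop?_natCast l n hnl]
      rw [hdel]
      rw [ih (l.eraseIdx n) (fun k hk hpk => by
        have := hb k (by omega) hpk
        rw [List.length_eraseIdx]
        simp only [hnl, if_true]
        omega)]
      exact pvE_erase Pf n l hnl hn
    · rw [Bool.not_eq_true] at hn
      rw [hn]
      simp only [Bool.false_eq_true, if_false, List.reverse_nil, List.nil_append]
      rw [ih l (fun k hk hpk => hb k (by omega) hpk)]
      exact pvE_congr_succ Pf n l hn

-- B's per-list pass computes the same normal form
theorem pvKeep_eq_E {α : Type} (energy : List (List Int)) (l : List α) :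
    pvKeep (PySem.Set.ofList (((PySem.List.enumerate energy 0).filter (fun p => pvRowZero p.2)).map (·.1))) l
    = pvE (fun i => pvRowZero (PySem.List.pyGetD energy i [])) energy.length l := by
  unfold pvKeep pvE
  congr 1
  apply List.filter_congr
  intro p hp
  rw [PySem.List.mem_enumerate_iff] at hp
  obtain ⟨k, hk, rfl⟩ := hp
  simp only [zero_add]
  congr 1
  by_cases hm : ((k : Int)) ∈ PySem.Set.ofList (((PySem.List.enumerate energy 0).filter (fun p => pvRowZero p.2)).map (·.1))
  · have hc : PySem.Set.contains _ ((k : Int)) = true := (PySem.Set.contains_iff _ _).mpr hm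
    rw [hc]
    rw [PySem.Set.mem_ofList] at hm
    simp only [List.mem_map, List.mem_filter] at hm
    obtain ⟨q, ⟨hq, hz⟩, hfst⟩ := hm
    rw [PySem.List.mem_enumerate_iff] at hq
    obtain ⟨j, hj, rfl⟩ := hq
    simp only [zero_add] at hfst hz
    have hjk : j = k := by exact_mod_cast hfst
    subst hjk
    have e1 : decide ((j : Int) < ((energy.length : Nat) : Int)) = true := by
      simp only [decide_eq_true_eq]; omega
    have e2 : PySem.List.pyGetD energy (j : Int) [] = energy[j] := by
      rw [PySem.List.pyGetD_natCast]
      simp [List.getD, hj]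
    rw [e1, e2, hz, Bool.and_self]
  · have hc : PySem.Set.contains (PySem.Set.ofList (((PySem.List.enumerate energy 0).filter (fun p => pvRowZero p.2)).map (·.1))) ((k : Int)) = false := by
      rcases hx : PySem.Set.contains (PySem.Set.ofList (((PySem.List.enumerate energy 0).filter (fun p => pvRowZero p.2)).map (·.1))) ((k : Int)) with _ | _
      · exact hx
      · exact absurd ((PySem.Set.contains_iff _ _).mp hx) hm
    rw [hc]
    rw [PySem.Set.mem_ofList] at hm
    by_cases hkn : k < energy.length
    · have e2 : PySem.List.pyGetD energy (k : Int) [] = energy[k] := by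
        rw [PySem.List.pyGetD_natCast]
        simp [List.getD, hkn]
      have hz : pvRowZero energy[k] = false := by
        by_contra hzz
        rw [Bool.not_eq_false] at hzz
        apply hm
        simp only [List.mem_map, List.mem_filter]
        exact ⟨((k : Int), energy[k]), ⟨(PySem.List.mem_enumerate_iff _ _ _).mpr ⟨k, hkn, by simp⟩, hzz⟩, rfl⟩
      rw [e2, hz, Bool.and_false]
    · have e1 : decide ((k : Int) < ((energy.length : Nat) : Int)) = false := by
        simp only [decide_eq_false_iff_not]; omega
      rw [e1, Bool.false_and]

-- ===== VERDICT (by name: the statement is the Claim_ definition above) =====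
theorem del_zero_arrays_spec : Claim_equal_del_zero_arrays := by
  intro power age coordinate_x coordinate_y angle_tetta angle_phi energy time hDom hPre
  unfold Spec_del_zero_arrays del_zero_arrays del_zero_arrays_alt
  dsimp only
  set Pf : Int → Bool := fun i => pvRowZero (PySem.List.pyGetD energy i []) with hPf
  rw [PySem.List.foldl_append_if_eq_filter Pf _ []]
  rw [List.nil_append]
  have hsorted : PySem.List.sorted ((PySem.List.pyRange 0 (energy.length : Int) 1).filter Pf) (fun x => x) true
      = ((PySem.List.pyRange 0 (energy.length : Int) 1).filter Pf).reverse := by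
    apply PySem.List.sorted_rev_eq_of_perm_of_pairwise_gt
    · exact List.reverse_perm _
    · rw [List.pairwise_reverse]
      exact (PySem.List.pairwise_lt_pyRange_one 0 (energy.length : Int)).filter Pf
  rw [hsorted, pvFoldl_del8]
  have hgd : ∀ k : Nat, Pf (k : Int) = pvRowZero (energy.getD k []) := by
    intro k
    rw [hPf]
    simp [PySem.List.pyGetD_natCast]
  have hbE : ∀ k : Nat, k < energy.length → Pf (k : Int) = true → k < energy.length := fun k hk _ => hk
  have hb : ∀ (k : Nat), k < energy.length → Pf (k : Int) = true →
      (k < power.length ∧ k < age.length ∧ k < coordinate_x.length ∧ k < coordinate_y.length ∧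
       k < angle_tetta.length ∧ k < angle_phi.length ∧ k < time.length) := by
    intro k hk hpk
    exact hPre k hk (by rw [← hgd k]; exact hpk)
  rw [pvDel_eq_E Pf energy.length power (fun k hk hpk => (hb k hk hpk).1),
      pvDel_eq_E Pf energy.length age (fun k hk hpk => (hb k hk hpk).2.1),
      pvDel_eq_E Pf energy.length coordinate_x (fun k hk hpk => (hb k hk hpk).2.2.1),
      pvDel_eq_E Pf energy.length coordinate_y (fun k hk hpk => (hb k hk hpk).2.2.2.1),
      pvDel_eq_E Pf energy.length angle_tetta (fun k hk hpk => (hb k hk hpk).2.2.2.2.1),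
      pvDel_eq_E Pf energy.length angle_phi (fun k hk hpk => (hb k hk hpk).2.2.2.2.2.1),
      pvDel_eq_E Pf energy.length energy hbE,
      pvDel_eq_E Pf energy.length time (fun k hk hpk => (hb k hk hpk).2.2.2.2.2.2)]
  rw [pvKeep_eq_E energy power, pvKeep_eq_E energy age, pvKeep_eq_E energy coordinate_x,
      pvKeep_eq_E energy coordinate_y, pvKeep_eq_E energy angle_tetta, pvKeep_eq_E energy angle_phi,
      pvKeep_eq_E energy energy, pvKeep_eq_E energy time]
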